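-- pv_equiv track=rewrite | github.com/hungnguyenmb/omnimind | src/ui/pages/auth_page.py | _sanitize_zalo_message
-- ===== SOURCE A (Python) =====
-- def _sanitize_zalo_message(message: str, fallback: str = "") -> str:
--     text = str(message or "").strip()
--     if not text:
--         return fallback
--     replacements = {
--         "OpenZCA": "môi trường Zalo",
--         "openzca": "môi trường Zalo",
--         "runtime OpenZCA": "môi trường Zalo",
--     }
--     for source, target in replacements.items():
--         text = text.replace(source, target)
--     return text
-- ===== SOURCE B (Python) =====
-- def _sanitize_zalo_message(message: str, fallback: str = "") -> str:
--     text = str(message or "").strip()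
--     if not text:
--         return fallback
--     out = []
--     i = 0
--     n = len(text)
--     while i < n:
--         if text.startswith(("OpenZCA", "openzca"), i):
--             out.append("môi trường Zalo")
--             i += 7
--         else:
--             out.append(text[i])
--             i += 1
--     return "".join(out)
-- ===== Notes on version B (the rewrite author's own statement) =====
-- stated objective: alternative
-- what changed: A's three sequential whole-text str.replace passes are replaced by one left-to-right scan with an index that checks text.startswith(('OpenZCA','openzca'), i) at each position, emits the replacement and jumps 7, so the text is traversed once and already-produced output is never rescanned.
-- intended difference: On messages containing 'OpenZCApenzca', A's second pass rescans text produced by its first pass and matches a lowercase token occurrence that straddles the replacement inserted by the first pass, mangling the surrounding text (e.g. returning 'môi trường Zalmôi trường Zalo' for the witness), while B replaces only token occurrences literally present in the input and returns 'môi trường Zalopenzca' there, which is the intended sanitisation. — e.g. on _sanitize_zalo_message("OpenZCApenzca", ""): A returns "môi trường Zalmôi trường Zalo", B returns "môi trường Zalopenzca"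
import Mathlib
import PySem

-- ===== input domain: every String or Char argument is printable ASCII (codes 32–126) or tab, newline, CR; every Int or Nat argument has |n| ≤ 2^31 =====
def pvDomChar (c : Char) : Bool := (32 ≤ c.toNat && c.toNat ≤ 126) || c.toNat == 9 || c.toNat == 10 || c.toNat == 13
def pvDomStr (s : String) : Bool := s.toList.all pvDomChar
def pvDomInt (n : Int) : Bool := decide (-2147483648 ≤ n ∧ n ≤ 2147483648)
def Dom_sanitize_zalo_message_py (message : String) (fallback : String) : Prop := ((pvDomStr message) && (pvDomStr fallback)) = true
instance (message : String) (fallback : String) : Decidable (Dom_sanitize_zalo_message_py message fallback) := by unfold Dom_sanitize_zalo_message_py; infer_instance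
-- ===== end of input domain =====

-- B replaces A's three sequential whole-text str.replace passes by one left-to-right
-- indexed scan that replaces "OpenZCA"/"openzca" where they start; on messages containing
-- "OpenZCApenzca" A's second pass rescans its own first pass's output (a cascade), and B
-- intentionally differs there (see D_ below); elsewhere they are proved equal.

-- ===== PORT A =====
-- literal port of A: text = str(message or "").strip(); empty -> fallback; then the dict of
-- replacements is built in insertion order and folded over with str.replace.
def sanitize_zalo_message_py (message : String) (fallback : String) : String :=
  let text := PySem.Str.strip (if message = "" then "" else message)
  if text = "" then fallback
  else
    let replacements : PySem.Dict String String :=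
      ((PySem.Dict.empty.insert "OpenZCA" "môi trường Zalo").insert
          "openzca" "môi trường Zalo").insert "runtime OpenZCA" "môi trường Zalo"
    replacements.items.foldl (fun t sv => PySem.Str.replace t sv.1 sv.2) text

-- ===== PORT B =====
-- literal port of Source B's while loop: i scans text; at each position either one of the two
-- tokens starts there (emit the replacement, i += 7) or the character is kept (i += 1).
-- The loop is ported as fuel recursion on the remaining characters (the loop runs at most
-- len(text) iterations, each consuming at least one character); out.append + "".join is
-- list concatenation.
def pvScanGo (fuel : Nat) (l : List Char) : List Char :=
  match fuel, l with
  | 0, _ => []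
  | _ + 1, [] => []
  | fuel + 1, c :: t =>
    if PySem.Chars.startswith (c :: t) "OpenZCA".toList
        || PySem.Chars.startswith (c :: t) "openzca".toList then
      "môi trường Zalo".toList ++ pvScanGo fuel (t.drop 6)
    else c :: pvScanGo fuel t

def sanitize_zalo_message_py_alt (message : String) (fallback : String) : String :=
  let text := PySem.Str.strip (if message = "" then "" else message)
  if text = "" then fallback
  else String.ofList (pvScanGo text.toList.length text.toList)

-- ===== PRECONDITION & SPEC =====
-- On messages containing "OpenZCApenzca" A's second replace pass matches a lowercase token
-- occurrence that straddles the replacement text its first pass inserted and mangles the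
-- surrounding text, while B replaces only token occurrences literally present in the input;
-- B's value is the intended sanitisation.
def D_sanitize_zalo_message_py (message : String) (fallback : String) : Prop :=
  PySem.Str.isIn "OpenZCApenzca" message = true
instance (message : String) (fallback : String) : Decidable (D_sanitize_zalo_message_py message fallback) := by unfold D_sanitize_zalo_message_py; infer_instance

def Spec_sanitize_zalo_message_py (message : String) (fallback : String) (out : String) : Prop := ¬ D_sanitize_zalo_message_py message fallback → out = sanitize_zalo_message_py_alt message fallback
instance (message : String) (fallback : String) (out : String) : Decidable (Spec_sanitize_zalo_message_py message fallback out) := by unfold Spec_sanitize_zalo_message_py; infer_instance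

def pvDiffWitness_sanitize_zalo_message_py : String × String := ("OpenZCApenzca", "")
def pvDiffWitnessOut_sanitize_zalo_message_py : String × String :=
  ("môi trường Zalmôi trường Zalo", "môi trường Zalopenzca")

-- ===== CLAIM (what is proved, stated in full; the proofs are below) =====
def Claim_unchanged_sanitize_zalo_message_py : Prop := ∀ (message : String) (fallback : String), Dom_sanitize_zalo_message_py message fallback → Spec_sanitize_zalo_message_py message fallback (sanitize_zalo_message_py message fallback)
def Claim_changed_sanitize_zalo_message_py : Prop := Dom_sanitize_zalo_message_py (pvDiffWitness_sanitize_zalo_message_py.1) (pvDiffWitness_sanitize_zalo_message_py.2) ∧ D_sanitize_zalo_message_py (pvDiffWitness_sanitize_zalo_message_py.1) (pvDiffWitness_sanitize_zalo_message_py.2) ∧ sanitize_zalo_message_py (pvDiffWitness_sanitize_zalo_message_py.1) (pvDiffWitness_sanitize_zalo_message_py.2) = pvDiffWitnessOut_sanitize_zalo_message_py.1 ∧ sanitize_zalo_message_py_alt (pvDiffWitness_sanitize_zalo_message_py.1) (pvDiffWitness_sanitize_zalo_message_py.2) = pvDiffWitnessOut_sanitize_zalo_message_py.2 ∧ pvDiffWitnessOut_sanitize_zalo_message_py.1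 ≠ pvDiffWitnessOut_sanitize_zalo_message_py.2

def Claim_exact_sanitize_zalo_message_py : Prop := ∀ (message : String) (fallback : String), Dom_sanitize_zalo_message_py message fallback → D_sanitize_zalo_message_py message fallback → sanitize_zalo_message_py message fallback ≠ sanitize_zalo_message_py_alt message fallback

-- ===== LEMMAS AND PROOFS =====

-- The pattern / replacement literals as explicit character lists.
def zP1 : List Char := ['O','p','e','n','Z','C','A']                    -- "OpenZCA"
def zP2 : List Char := ['o','p','e','n','z','c','a']                    -- "openzca"
def zP3 : List Char := ['r','u','n','t','i','m','e',' ','O','p','e','n','Z','C','A']  -- "runtime OpenZCA"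
def zR  : List Char := ['m','ô','i',' ','t','r','ư','ờ','n','g',' ','Z','a','l','o']  -- "môi trường Zalo"
def zQ  : List Char := ['p','e','n','z','c','a']                        -- "penzca"
def zQ1 : List Char := ['u','n','t','i','m','e',' ','O','p','e','n','Z','C','A']      -- zP3 minus its head
def zPat : List Char := zP1 ++ zQ                                       -- "OpenZCApenzca"

-- fuel-free reformulation of Python's str.replace (one pass, non-overlapping, left to right)
def RF (sep new : List Char) : List Char → List Char
  | [] => []
  | c :: t =>
    if sep.isPrefixOf (c :: t) then new ++ RF sep new (t.drop (sep.length - 1))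
    else c :: RF sep new t
  termination_by l => l.length
  decreasing_by all_goals (simp [List.length_drop]; try omega)

-- fuel-free reformulation of B's scan
def SF : List Char → List Char
  | [] => []
  | c :: t =>
    if zP1.isPrefixOf (c :: t) || zP2.isPrefixOf (c :: t) then zR ++ SF (t.drop 6)
    else c :: SF t
  termination_by l => l.length
  decreasing_by all_goals (simp [List.length_drop]; try omega)

theorem RF_nil (sep new : List Char) : RF sep new [] = [] := by rw [RF]

theorem RF_pos {sep : List Char} (new : List Char) {c : Char} {t : List Char}
    (h : sep.isPrefixOf (c :: t) = true) :
    RF sep new (c :: t) = new ++ RF sep new (t.drop (sep.length - 1)) := by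
  rw [RF, if_pos h]

theorem RF_neg {sep : List Char} (new : List Char) {c : Char} {t : List Char}
    (h : sep.isPrefixOf (c :: t) = false) :
    RF sep new (c :: t) = c :: RF sep new t := by
  rw [RF, if_neg (by simp [h])]

theorem SF_nil : SF [] = [] := by rw [SF]

theorem SF_pos {c : Char} {t : List Char}
    (h : (zP1.isPrefixOf (c :: t) || zP2.isPrefixOf (c :: t)) = true) :
    SF (c :: t) = zR ++ SF (t.drop 6) := by
  rw [SF, if_pos h]

theorem SF_neg {c : Char} {t : List Char}
    (h : (zP1.isPrefixOf (c :: t) || zP2.isPrefixOf (c :: t)) = false) :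
    SF (c :: t) = c :: SF t := by
  rw [SF, if_neg (by simp [h])]

-- replace.go with a non-empty accumulator is the accumulator (reversed) glued in front.
theorem rep_go_acc (sep new : List Char) :
    ∀ fuel l racc, PySem.Chars.replace.go sep new fuel l racc
      = racc.reverse ++ PySem.Chars.replace.go sep new fuel l [] := by
  intro fuel
  induction fuel with
  | zero => intro l racc; simp [PySem.Chars.replace.go]
  | succ f ih =>
    intro l racc
    cases l with
    | nil => simp [PySem.Chars.replace.go]
    | cons c t =>
      show (if sep.isPrefixOf (c::t) then _ else _) = racc.reverse ++ (if sep.isPrefixOf (c::t) then _ else _)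
      split_ifs with h
      · rw [ih _ (new.reverse ++ racc), ih _ (new.reverse ++ [])]; simp
      · rw [ih _ (c :: racc), ih _ (c :: [])]; simp

-- with enough fuel, replace.go computes RF
theorem go_eq_RF (sep new : List Char) (hsep : sep ≠ []) :
    ∀ fuel l, l.length ≤ fuel → PySem.Chars.replace.go sep new fuel l [] = RF sep new l := by
  intro fuel
  induction fuel with
  | zero =>
    intro l h
    have hl : l = [] := List.eq_nil_of_length_eq_zero (Nat.le_zero.mp h)
    subst hl
    simp [PySem.Chars.replace.go, RF_nil]
  | succ f ih =>
    intro l h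
    cases l with
    | nil => simp [PySem.Chars.replace.go, RF_nil]
    | cons c t =>
      obtain ⟨m, hm⟩ : ∃ m, sep.length = m + 1 := by
        cases sep with
        | nil => exact absurd rfl hsep
        | cons a b => exact ⟨b.length, by simp⟩
      simp only [List.length_cons] at h
      show (if sep.isPrefixOf (c::t) then _ else _) = _
      split_ifs with hp
      · rw [rep_go_acc, RF_pos new hp]
        have hd : List.drop sep.length (c :: t) = t.drop (sep.length - 1) := by
          rw [hm]; simp [List.drop_succ_cons]
        rw [hd, ih _ (by simp [List.length_drop]; omega)]
        simp
      · rw [rep_go_acc, RF_neg new (by simp [hp]), ih _ (by omega)]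
        simp

theorem replace_eq_RF (l sep new : List Char) (hsep : sep ≠ []) :
    PySem.Chars.replace l sep new = RF sep new l := by
  rw [PySem.Chars.replace, if_neg (by simpa [List.isEmpty_iff] using hsep)]
  exact go_eq_RF sep new hsep l.length l le_rfl

-- with enough fuel, B's ported loop computes SF
theorem pvScanGo_eq_SF : ∀ fuel l, l.length ≤ fuel → pvScanGo fuel l = SF l := by
  intro fuel
  induction fuel with
  | zero =>
    intro l h
    have hl : l = [] := List.eq_nil_of_length_eq_zero (Nat.le_zero.mp h)
    subst hl
    simp [pvScanGo, SF_nil]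
  | succ f ih =>
    intro l h
    cases l with
    | nil => simp [pvScanGo, SF_nil]
    | cons c t =>
      simp only [List.length_cons] at h
      have h1 : "OpenZCA".toList = zP1 := by decide
      have h2 : "openzca".toList = zP2 := by decide
      have hr : "môi trường Zalo".toList = zR := by decide
      show (if PySem.Chars.startswith (c :: t) "OpenZCA".toList
          || PySem.Chars.startswith (c :: t) "openzca".toList then
        "môi trường Zalo".toList ++ pvScanGo f (t.drop 6)
      else c :: pvScanGo f t) = SF (c :: t)
      simp only [PySem.Chars.startswith, h1, h2, hr]
      split_ifs with hp
      · rw [SF_pos hp, ih _ (by simp [List.length_drop]; omega)]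
      · rw [SF_neg (Bool.eq_false_iff.mpr hp), ih _ (by omega)]

-- "no nonempty suffix of q can begin matching an inserted replacement block"
def NoCol (q : List Char) : Prop :=
  ∀ k (Y : List Char), q.drop k ≠ [] → (q.drop k).isPrefixOf (zR ++ Y) = false

theorem NoCol_zQ : NoCol zQ := by
  intro k Y h
  by_cases hk : 6 ≤ k
  · exact absurd (List.drop_eq_nil_of_le (by simp [zQ]; omega)) h
  · push_neg at hk
    interval_cases k <;> simp [zQ, zR, List.isPrefixOf]

theorem NoCol_zQ1 : NoCol zQ1 := by
  intro k Y h
  by_cases hk : 14 ≤ k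
  · exact absurd (List.drop_eq_nil_of_le (by simp [zQ1]; omega)) h
  · push_neg at hk
    interval_cases k <;> simp [zQ1, zR, List.isPrefixOf]

-- a prefix of the first replace pass's output that cannot match inside a replacement
-- block is already a prefix of the input
theorem LRGen : ∀ (t q : List Char), NoCol q →
    q.isPrefixOf (RF zP1 zR t) = true → q.isPrefixOf t = true := by
  intro t
  induction t with
  | nil => intro q _ h; rwa [RF_nil] at h
  | cons c t ih =>
    intro q hq h
    by_cases hp : zP1.isPrefixOf (c :: t) = true
    · rw [RF_pos zR hp] at h
      cases q with
      | nil => simp [List.isPrefixOf]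
      | cons a q' =>
        have := hq 0 (RF zP1 zR (t.drop (zP1.length - 1))) (by simp)
        rw [List.drop_zero] at this
        rw [this] at h
        cases h
    · rw [RF_neg zR (by simp [hp])] at h
      cases q with
      | nil => simp [List.isPrefixOf]
      | cons a q' =>
        simp only [List.isPrefixOf, Bool.and_eq_true, beq_iff_eq] at h
        obtain ⟨hac, h2⟩ := h
        have hq' : NoCol q' := by
          intro k Y hne
          have := hq (k + 1) Y (by simpa [List.drop_succ_cons] using hne)
          simpa [List.drop_succ_cons] using this
        have := ih q' hq' h2
        simp [List.isPrefixOf, hac, this]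

-- the same statement for B's scan
theorem LSGen : ∀ (t q : List Char), NoCol q →
    q.isPrefixOf (SF t) = true → q.isPrefixOf t = true := by
  intro t
  induction t with
  | nil => intro q _ h; rwa [SF_nil] at h
  | cons c t ih =>
    intro q hq h
    by_cases hp : (zP1.isPrefixOf (c :: t) || zP2.isPrefixOf (c :: t)) = true
    · rw [SF_pos hp] at h
      cases q with
      | nil => simp [List.isPrefixOf]
      | cons a q' =>
        have := hq 0 (SF (t.drop 6)) (by simp)
        rw [List.drop_zero] at this
        rw [this] at h
        cases h
    · rw [SF_neg (Bool.eq_false_iff.mpr hp)] at h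
      cases q with
      | nil => simp [List.isPrefixOf]
      | cons a q' =>
        simp only [List.isPrefixOf, Bool.and_eq_true, beq_iff_eq] at h
        obtain ⟨hac, h2⟩ := h
        have hq' : NoCol q' := by
          intro k Y hne
          have := hq (k + 1) Y (by simpa [List.drop_succ_cons] using hne)
          simpa [List.drop_succ_cons] using this
        have := ih q' hq' h2
        simp [List.isPrefixOf, hac, this]

-- pass 2 steps over an inserted replacement block unless "penzca" follows it
theorem A1 (X : List Char) (h : zQ.isPrefixOf X = false) :
    RF zP2 zR (zR ++ X) = zR ++ RF zP2 zR X := by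
  have h' : (['p','e','n','z','c','a'] : List Char).isPrefixOf X = false := by simpa [zQ] using h
  show RF zP2 zR ('m'::'ô'::'i'::' '::'t'::'r'::'ư'::'ờ'::'n'::'g'::' '::'Z'::'a'::'l'::'o'::X)
      = zR ++ RF zP2 zR X
  rw [RF_neg zR (by simp [zP2, List.isPrefixOf])]
  rw [RF_neg zR (by simp [zP2, List.isPrefixOf])]
  rw [RF_neg zR (by simp [zP2, List.isPrefixOf])]
  rw [RF_neg zR (by simp [zP2, List.isPrefixOf])]
  rw [RF_neg zR (by simp [zP2, List.isPrefixOf])]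
  rw [RF_neg zR (by simp [zP2, List.isPrefixOf])]
  rw [RF_neg zR (by simp [zP2, List.isPrefixOf])]
  rw [RF_neg zR (by simp [zP2, List.isPrefixOf])]
  rw [RF_neg zR (by simp [zP2, List.isPrefixOf])]
  rw [RF_neg zR (by simp [zP2, List.isPrefixOf])]
  rw [RF_neg zR (by simp [zP2, List.isPrefixOf])]
  rw [RF_neg zR (by simp [zP2, List.isPrefixOf])]
  rw [RF_neg zR (by simp [zP2, List.isPrefixOf])]
  rw [RF_neg zR (by simp [zP2, List.isPrefixOf])]
  rw [RF_neg (sep := zP2) (c := 'o') (t := X) zR (by simp [zP2, List.isPrefixOf, h'])]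
  simp [zR]

-- pass 3 always steps over an inserted replacement block
theorem B1 (X : List Char) : RF zP3 zR (zR ++ X) = zR ++ RF zP3 zR X := by
  show RF zP3 zR ('m'::'ô'::'i'::' '::'t'::'r'::'ư'::'ờ'::'n'::'g'::' '::'Z'::'a'::'l'::'o'::X)
      = zR ++ RF zP3 zR X
  repeat rw [RF_neg zR (by simp [zP3, List.isPrefixOf])]
  simp [zR]

-- pass 1 steps over an "openzca" occurrence
theorem C1 (X : List Char) : RF zP1 zR (zP2 ++ X) = zP2 ++ RF zP1 zR X := by
  show RF zP1 zR ('o'::'p'::'e'::'n'::'z'::'c'::'a'::X) = zP2 ++ RF zP1 zR X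
  repeat rw [RF_neg zR (by simp [zP1, List.isPrefixOf])]
  simp [zP2]

theorem R1m (X : List Char) : RF zP1 zR (zP1 ++ X) = zR ++ RF zP1 zR X := by
  show RF zP1 zR ('O'::'p'::'e'::'n'::'Z'::'C'::'A'::X) = zR ++ RF zP1 zR X
  rw [RF_pos zR (by simp [zP1, List.isPrefixOf])]
  simp [zP1]

theorem R2m (X : List Char) : RF zP2 zR (zP2 ++ X) = zR ++ RF zP2 zR X := by
  show RF zP2 zR ('o'::'p'::'e'::'n'::'z'::'c'::'a'::X) = zR ++ RF zP2 zR X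
  rw [RF_pos zR (by simp [zP2, List.isPrefixOf])]
  simp [zP2]

theorem S1m (X : List Char) : SF (zP1 ++ X) = zR ++ SF X := by
  show SF ('O'::'p'::'e'::'n'::'Z'::'C'::'A'::X) = zR ++ SF X
  rw [SF_pos (by simp [zP1, List.isPrefixOf])]
  simp

theorem S2m (X : List Char) : SF (zP2 ++ X) = zR ++ SF X := by
  show SF ('o'::'p'::'e'::'n'::'z'::'c'::'a'::X) = zR ++ SF X
  rw [SF_pos (by simp [zP1, zP2, List.isPrefixOf])]
  simp

-- the scan on "untime OpenZCA…" keeps "untime " and replaces the token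
theorem SU (w : List Char) :
    SF ('u'::'n'::'t'::'i'::'m'::'e'::' '::(zP1 ++ w))
      = 'u'::'n'::'t'::'i'::'m'::'e'::' '::(zR ++ SF w) := by
  repeat rw [SF_neg (by simp [zP1, zP2, List.isPrefixOf])]
  rw [S1m]

-- main lemma: outside D_, pass 2 after pass 1 is exactly B's one scan
theorem T1 : ∀ (n : Nat) (l : List Char), l.length ≤ n → ¬ zPat <:+: l →
    RF zP2 zR (RF zP1 zR l) = SF l := by
  intro n
  induction n with
  | zero =>
    intro l h _
    have hl : l = [] := List.eq_nil_of_length_eq_zero (Nat.le_zero.mp h)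
    subst hl
    simp [RF_nil, SF_nil]
  | succ n ih =>
    intro l hlen hinf
    cases l with
    | nil => simp [RF_nil, SF_nil]
    | cons c t =>
      simp only [List.length_cons] at hlen
      by_cases h1 : zP1.isPrefixOf (c :: t) = true
      · obtain ⟨u, hu⟩ := List.isPrefixOf_iff_prefix.mp h1
        rw [← hu] at hinf ⊢
        have hlu : u.length ≤ n := by
          have := congrArg List.length hu
          simp [zP1] at this
          omega
        have hqu : zQ.isPrefixOf u = false := by
          refine Bool.eq_false_iff.mpr fun hqv => hinf ?_
          obtain ⟨v, hv⟩ := List.isPrefixOf_iff_prefix.mp hqv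
          exact ⟨[], v, by simp [zPat, ← hv]⟩
        have hq2 : zQ.isPrefixOf (RF zP1 zR u) = false := by
          refine Bool.eq_false_iff.mpr fun hh => ?_
          have := LRGen u zQ NoCol_zQ hh
          rw [this] at hqu
          cases hqu
        have hiu : ¬ zPat <:+: u := by
          intro hi
          obtain ⟨s, t', hst⟩ := hi
          exact hinf ⟨zP1 ++ s, t', by rw [← hst]; simp⟩
        rw [R1m, A1 _ hq2, ih u hlu hiu, S1m]
      · by_cases h2 : zP2.isPrefixOf (c :: t) = true
        · obtain ⟨u, hu⟩ := List.isPrefixOf_iff_prefix.mp h2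
          rw [← hu] at hinf ⊢
          have hlu : u.length ≤ n := by
            have := congrArg List.length hu
            simp [zP2] at this
            omega
          have hiu : ¬ zPat <:+: u := by
            intro hi
            obtain ⟨s, t', hst⟩ := hi
            exact hinf ⟨zP2 ++ s, t', by rw [← hst]; simp⟩
          rw [C1, R2m, ih u hlu hiu, S2m]
        · have h1f : zP1.isPrefixOf (c :: t) = false := by simp [h1]
          have h2f : zP2.isPrefixOf (c :: t) = false := by simp [h2]
          have hit : ¬ zPat <:+: t := by
            intro hi
            obtain ⟨s, t', hst⟩ := hi
            exact hinf ⟨c :: s, t', by rw [← hst]; simp⟩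
          have hc : zP2.isPrefixOf (c :: RF zP1 zR t) = false := by
            refine Bool.eq_false_iff.mpr fun hh => ?_
            simp only [zP2, List.isPrefixOf, Bool.and_eq_true, beq_iff_eq] at hh
            obtain ⟨hoc, hrest⟩ := hh
            have hthis := LRGen t zQ NoCol_zQ (by simpa [zQ] using hrest)
            have hpen : (['p','e','n','z','c','a'] : List Char).isPrefixOf t = true := by
              simpa [zQ] using hthis
            apply h2
            subst hoc
            simp [zP2, List.isPrefixOf, hpen]
          rw [RF_neg zR h1f, RF_neg zR hc, SF_neg (by simp [h1f, h2f]),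
            ih t (by omega) hit]

-- pass 3 never fires on B's scan output
theorem T2 : ∀ (n : Nat) (l : List Char), l.length ≤ n → RF zP3 zR (SF l) = SF l := by
  intro n
  induction n with
  | zero =>
    intro l h
    have hl : l = [] := List.eq_nil_of_length_eq_zero (Nat.le_zero.mp h)
    subst hl
    simp [RF_nil, SF_nil]
  | succ n ih =>
    intro l hlen
    cases l with
    | nil => simp [RF_nil, SF_nil]
    | cons c t =>
      simp only [List.length_cons] at hlen
      by_cases hp : (zP1.isPrefixOf (c :: t) || zP2.isPrefixOf (c :: t)) = true
      · rw [SF_pos hp, B1, ih _ (by simp [List.length_drop]; omega)]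
      · rw [SF_neg (Bool.eq_false_iff.mpr hp)]
        have hc : zP3.isPrefixOf (c :: SF t) = false := by
          refine Bool.eq_false_iff.mpr fun hh => ?_
          simp only [zP3, List.isPrefixOf, Bool.and_eq_true, beq_iff_eq] at hh
          obtain ⟨hrc, hrest⟩ := hh
          have hq1 : zQ1.isPrefixOf t = true :=
            LSGen t zQ1 NoCol_zQ1 (by simpa [zQ1] using hrest)
          obtain ⟨w, hw⟩ := List.isPrefixOf_iff_prefix.mp hq1
          rw [← hw] at hrest
          rw [show zQ1 ++ w = 'u'::'n'::'t'::'i'::'m'::'e'::' '::(zP1 ++ w) from by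
            simp [zQ1, zP1]] at hrest
          rw [SU] at hrest
          rw [show ((['u','n','t','i','m','e',' ','O','p','e','n','Z','C','A'] :
              List Char).isPrefixOf
              ('u'::'n'::'t'::'i'::'m'::'e'::' '::(zR ++ SF w))) = false from by
            simp [zR, List.isPrefixOf]] at hrest
          cases hrest
        rw [RF_neg zR hc, ih t (by omega)]

-- strip produces an infix of its input
theorem stripInfix (x : List Char) : PySem.Chars.strip x <:+: x := by
  unfold PySem.Chars.strip PySem.Chars.rstrip PySem.Chars.lstrip
  have h1 : List.dropWhile PySem.Chars.isspace x <:+ x := List.dropWhile_suffix _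
  have h2 : (List.dropWhile PySem.Chars.isspace
      (List.dropWhile PySem.Chars.isspace x).reverse).reverse
      <+: List.dropWhile PySem.Chars.isspace x := by
    conv_rhs => rw [← List.reverse_reverse (List.dropWhile PySem.Chars.isspace x)]
    exact List.reverse_prefix.mpr (List.dropWhile_suffix _)
  obtain ⟨w, hw⟩ := h2
  obtain ⟨a, ha⟩ := h1
  exact ⟨a, w, by rw [List.append_assoc, hw, ha]⟩

-- ===== tightness: inside D_ the two programs always differ (count of 'ô') =====

-- pass 2 fires on the straddle when "penzca" follows an inserted block
theorem A2 (X : List Char) (h : zQ.isPrefixOf X = true) :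
    RF zP2 zR (zR ++ X)
      = ['m','ô','i',' ','t','r','ư','ờ','n','g',' ','Z','a','l']
        ++ (zR ++ RF zP2 zR (X.drop 6)) := by
  show RF zP2 zR ('m'::'ô'::'i'::' '::'t'::'r'::'ư'::'ờ'::'n'::'g'::' '::'Z'::'a'::'l'::'o'::X) = _
  rw [RF_neg zR (by simp [zP2, List.isPrefixOf])]
  rw [RF_neg zR (by simp [zP2, List.isPrefixOf])]
  rw [RF_neg zR (by simp [zP2, List.isPrefixOf])]
  rw [RF_neg zR (by simp [zP2, List.isPrefixOf])]
  rw [RF_neg zR (by simp [zP2, List.isPrefixOf])]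
  rw [RF_neg zR (by simp [zP2, List.isPrefixOf])]
  rw [RF_neg zR (by simp [zP2, List.isPrefixOf])]
  rw [RF_neg zR (by simp [zP2, List.isPrefixOf])]
  rw [RF_neg zR (by simp [zP2, List.isPrefixOf])]
  rw [RF_neg zR (by simp [zP2, List.isPrefixOf])]
  rw [RF_neg zR (by simp [zP2, List.isPrefixOf])]
  rw [RF_neg zR (by simp [zP2, List.isPrefixOf])]
  rw [RF_neg zR (by simp [zP2, List.isPrefixOf])]
  rw [RF_neg zR (by simp [zP2, List.isPrefixOf])]
  rw [RF_pos (sep := zP2) (c := 'o') (t := X) zR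
    (by simp [zP2, List.isPrefixOf]; simpa [zQ] using h)]
  simp [zP2]

-- pass 1 steps over a literal "penzca"
theorem CQ1 (w : List Char) : RF zP1 zR (zQ ++ w) = zQ ++ RF zP1 zR w := by
  show RF zP1 zR ('p'::'e'::'n'::'z'::'c'::'a'::w) = zQ ++ RF zP1 zR w
  repeat rw [RF_neg zR (by simp [zP1, List.isPrefixOf])]
  simp [zQ]

-- the scan steps over a literal "penzca"
theorem SQ (w : List Char) : SF (zQ ++ w) = zQ ++ SF w := by
  show SF ('p'::'e'::'n'::'z'::'c'::'a'::w) = zQ ++ SF w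
  repeat rw [SF_neg (by simp [zP1, zP2, List.isPrefixOf])]
  simp [zQ]

-- pass 3 never decreases the number of 'ô' characters
theorem M3 : ∀ (n : Nat) (Y : List Char), Y.length ≤ n →
    Y.count 'ô' ≤ (RF zP3 zR Y).count 'ô' := by
  intro n
  induction n with
  | zero =>
    intro Y h
    have hl : Y = [] := List.eq_nil_of_length_eq_zero (Nat.le_zero.mp h)
    subst hl; simp [RF_nil]
  | succ n ih =>
    intro Y hlen
    cases Y with
    | nil => simp [RF_nil]
    | cons c t =>
      simp only [List.length_cons] at hlen
      by_cases hp : zP3.isPrefixOf (c :: t) = true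
      · obtain ⟨rest, hr⟩ := List.isPrefixOf_iff_prefix.mp hp
        have hdrop : t.drop (zP3.length - 1) = rest := by
          have h15 := congrArg (List.drop 15) hr
          simp [zP3] at h15 ⊢
          exact h15.symm
        rw [RF_pos zR hp, hdrop, ← hr]
        have hlr : rest.length ≤ n := by
          have := congrArg List.length hr
          simp [zP3] at this
          omega
        have := ih rest hlr
        simp only [List.count_append,
          show zP3.count 'ô' = 0 from by decide,
          show zR.count 'ô' = 1 from by decide]
        omega
      · rw [RF_neg zR (by simp [hp])]
        simp only [List.count_cons]
        exact Nat.add_le_add_right (ih t (by omega)) _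

-- B's scan never inserts more blocks than A's first two passes
theorem GE : ∀ (n : Nat) (l : List Char), l.length ≤ n →
    (SF l).count 'ô' ≤ (RF zP2 zR (RF zP1 zR l)).count 'ô' := by
  intro n
  induction n with
  | zero =>
    intro l h
    have hl : l = [] := List.eq_nil_of_length_eq_zero (Nat.le_zero.mp h)
    subst hl; simp [RF_nil, SF_nil]
  | succ n ih =>
    intro l hlen
    cases l with
    | nil => simp [RF_nil, SF_nil]
    | cons c t =>
      simp only [List.length_cons] at hlen
      by_cases h1 : zP1.isPrefixOf (c :: t) = true
      · obtain ⟨u, hu⟩ := List.isPrefixOf_iff_prefix.mp h1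
        rw [← hu]
        by_cases hq : zQ.isPrefixOf u = true
        · obtain ⟨w, hw⟩ := List.isPrefixOf_iff_prefix.mp hq
          rw [← hw]
          have hwn : w.length ≤ n := by
            have e1 := congrArg List.length hu
            have e2 := congrArg List.length hw
            simp [zP1, zQ] at e1 e2
            omega
          rw [R1m, CQ1, A2 _ (by
            rw [List.isPrefixOf_iff_prefix]; exact ⟨RF zP1 zR w, rfl⟩)]
          rw [S1m, SQ,
            show (zQ ++ RF zP1 zR w).drop 6 = RF zP1 zR w from by simp [zQ]]
          have := ih w hwn
          simp only [List.count_append,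
            show zR.count 'ô' = 1 from by decide,
            show zQ.count 'ô' = 0 from by decide,
            show (['m','ô','i',' ','t','r','ư','ờ','n','g',' ','Z','a','l'] :
              List Char).count 'ô' = 1 from by decide]
          omega
        · have hlu : u.length ≤ n := by
            have := congrArg List.length hu
            simp [zP1] at this
            omega
          have hq2 : zQ.isPrefixOf (RF zP1 zR u) = false := by
            refine Bool.eq_false_iff.mpr fun hh => ?_
            have := LRGen u zQ NoCol_zQ hh
            rw [this] at hq
            exact hq rfl
          rw [R1m, A1 _ hq2, S1m]
          have := ih u hlu
          simp only [List.count_append, show zR.count 'ô' = 1 from by decide]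
          omega
      · by_cases h2 : zP2.isPrefixOf (c :: t) = true
        · obtain ⟨u, hu⟩ := List.isPrefixOf_iff_prefix.mp h2
          rw [← hu]
          have hlu : u.length ≤ n := by
            have := congrArg List.length hu
            simp [zP2] at this
            omega
          rw [C1, R2m, S2m]
          have := ih u hlu
          simp only [List.count_append, show zR.count 'ô' = 1 from by decide]
          omega
        · have h1f : zP1.isPrefixOf (c :: t) = false := by simp [h1]
          have h2f : zP2.isPrefixOf (c :: t) = false := by simp [h2]
          have hc : zP2.isPrefixOf (c :: RF zP1 zR t) = false := by
            refine Bool.eq_false_iff.mpr fun hh => ?_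
            simp only [zP2, List.isPrefixOf, Bool.and_eq_true, beq_iff_eq] at hh
            obtain ⟨hoc, hrest⟩ := hh
            have hthis := LRGen t zQ NoCol_zQ (by simpa [zQ] using hrest)
            have hpen : (['p','e','n','z','c','a'] : List Char).isPrefixOf t = true := by
              simpa [zQ] using hthis
            apply h2
            subst hoc
            simp [zP2, List.isPrefixOf, hpen]
          rw [RF_neg zR h1f, RF_neg zR hc, SF_neg (by simp [h1f, h2f])]
          simp only [List.count_cons]
          exact Nat.add_le_add_right (ih t (by omega)) _

theorem infix_cons_elim {c : Char} {t : List Char} (h : zPat <:+: (c :: t)) :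
    zPat.isPrefixOf (c :: t) = true ∨ zPat <:+: t := by
  obtain ⟨s, t', hst⟩ := h
  cases s with
  | nil =>
    left
    rw [List.isPrefixOf_iff_prefix]
    exact ⟨t', by simpa using hst⟩
  | cons d s' =>
    right
    refine ⟨s', t', ?_⟩
    have := hst
    simp only [List.cons_append] at this
    exact (List.cons.injEq _ _ _ _ ▸ this).2

-- the pattern cannot start strictly inside a leading "OpenZCA" token
theorem infix_drop7_p1 (u : List Char) (hq : zQ.isPrefixOf u = false)
    (h : zPat <:+: (zP1 ++ u)) : zPat <:+: u := by
  have h0 : zPat <:+: ('O'::'p'::'e'::'n'::'Z'::'C'::'A'::u) := by simpa [zP1] using h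
  rcases infix_cons_elim h0 with hpre | h0
  · exfalso
    have : zQ.isPrefixOf u = true := by
      simpa [zPat, zP1, zQ, List.isPrefixOf] using hpre
    rw [this] at hq; exact absurd hq (by simp)
  rcases infix_cons_elim h0 with hpre | h0
  · exact absurd hpre (by simp [zPat, zP1, zQ, List.isPrefixOf])
  rcases infix_cons_elim h0 with hpre | h0
  · exact absurd hpre (by simp [zPat, zP1, zQ, List.isPrefixOf])
  rcases infix_cons_elim h0 with hpre | h0
  · exact absurd hpre (by simp [zPat, zP1, zQ, List.isPrefixOf])
  rcases infix_cons_elim h0 with hpre | h0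
  · exact absurd hpre (by simp [zPat, zP1, zQ, List.isPrefixOf])
  rcases infix_cons_elim h0 with hpre | h0
  · exact absurd hpre (by simp [zPat, zP1, zQ, List.isPrefixOf])
  rcases infix_cons_elim h0 with hpre | h0
  · exact absurd hpre (by simp [zPat, zP1, zQ, List.isPrefixOf])
  exact h0

-- nor strictly inside a leading "openzca" token
theorem infix_drop7_p2 (u : List Char) (h : zPat <:+: (zP2 ++ u)) : zPat <:+: u := by
  have h0 : zPat <:+: ('o'::'p'::'e'::'n'::'z'::'c'::'a'::u) := by simpa [zP2] using h
  rcases infix_cons_elim h0 with hpre | h0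
  · exact absurd hpre (by simp [zPat, zP1, zQ, List.isPrefixOf])
  rcases infix_cons_elim h0 with hpre | h0
  · exact absurd hpre (by simp [zPat, zP1, zQ, List.isPrefixOf])
  rcases infix_cons_elim h0 with hpre | h0
  · exact absurd hpre (by simp [zPat, zP1, zQ, List.isPrefixOf])
  rcases infix_cons_elim h0 with hpre | h0
  · exact absurd hpre (by simp [zPat, zP1, zQ, List.isPrefixOf])
  rcases infix_cons_elim h0 with hpre | h0
  · exact absurd hpre (by simp [zPat, zP1, zQ, List.isPrefixOf])
  rcases infix_cons_elim h0 with hpre | h0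
  · exact absurd hpre (by simp [zPat, zP1, zQ, List.isPrefixOf])
  rcases infix_cons_elim h0 with hpre | h0
  · exact absurd hpre (by simp [zPat, zP1, zQ, List.isPrefixOf])
  exact h0

-- when the text contains "OpenZCApenzca", A's first two passes insert strictly
-- more blocks than B's scan
theorem STRICT : ∀ (n : Nat) (l : List Char), l.length ≤ n → zPat <:+: l →
    (SF l).count 'ô' < (RF zP2 zR (RF zP1 zR l)).count 'ô' := by
  intro n
  induction n with
  | zero =>
    intro l h hi
    have hl : l = [] := List.eq_nil_of_length_eq_zero (Nat.le_zero.mp h)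
    subst hl
    obtain ⟨s, t, hst⟩ := hi
    simp [zPat, zP1, zQ] at hst
  | succ n ih =>
    intro l hlen hinf
    cases l with
    | nil =>
      obtain ⟨s, t, hst⟩ := hinf
      simp [zPat, zP1, zQ] at hst
    | cons c t =>
      simp only [List.length_cons] at hlen
      by_cases h1 : zP1.isPrefixOf (c :: t) = true
      · obtain ⟨u, hu⟩ := List.isPrefixOf_iff_prefix.mp h1
        rw [← hu] at hinf ⊢
        by_cases hq : zQ.isPrefixOf u = true
        · obtain ⟨w, hw⟩ := List.isPrefixOf_iff_prefix.mp hq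
          rw [← hw]
          have hwn : w.length ≤ n := by
            have e1 := congrArg List.length hu
            have e2 := congrArg List.length hw
            simp [zP1, zQ] at e1 e2
            omega
          rw [R1m, CQ1, A2 _ (by
            rw [List.isPrefixOf_iff_prefix]; exact ⟨RF zP1 zR w, rfl⟩)]
          rw [S1m, SQ,
            show (zQ ++ RF zP1 zR w).drop 6 = RF zP1 zR w from by simp [zQ]]
          have := GE w.length w le_rfl
          simp only [List.count_append,
            show zR.count 'ô' = 1 from by decide,
            show zQ.count 'ô' = 0 from by decide,
            show (['m','ô','i',' ','t','r','ư','ờ','n','g',' ','Z','a','l'] :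
              List Char).count 'ô' = 1 from by decide]
          omega
        · have hlu : u.length ≤ n := by
            have := congrArg List.length hu
            simp [zP1] at this
            omega
          have hq2 : zQ.isPrefixOf (RF zP1 zR u) = false := by
            refine Bool.eq_false_iff.mpr fun hh => ?_
            have := LRGen u zQ NoCol_zQ hh
            rw [this] at hq
            exact hq rfl
          have hiu : zPat <:+: u :=
            infix_drop7_p1 u (Bool.eq_false_iff.mpr hq) hinf
          rw [R1m, A1 _ hq2, S1m]
          have := ih u hlu hiu
          simp only [List.count_append, show zR.count 'ô' = 1 from by decide]
          omega
      · by_cases h2 : zP2.isPrefixOf (c :: t) = true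
        · obtain ⟨u, hu⟩ := List.isPrefixOf_iff_prefix.mp h2
          rw [← hu] at hinf ⊢
          have hlu : u.length ≤ n := by
            have := congrArg List.length hu
            simp [zP2] at this
            omega
          have hiu : zPat <:+: u := infix_drop7_p2 u hinf
          rw [C1, R2m, S2m]
          have := ih u hlu hiu
          simp only [List.count_append, show zR.count 'ô' = 1 from by decide]
          omega
        · have h1f : zP1.isPrefixOf (c :: t) = false := by simp [h1]
          have h2f : zP2.isPrefixOf (c :: t) = false := by simp [h2]
          have hit : zPat <:+: t := by
            rcases infix_cons_elim hinf with hpre | hh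
            · exfalso
              apply h1
              rw [List.isPrefixOf_iff_prefix] at hpre ⊢
              exact List.IsPrefix.trans (⟨zQ, rfl⟩ : zP1 <+: zPat) hpre
            · exact hh
          have hc : zP2.isPrefixOf (c :: RF zP1 zR t) = false := by
            refine Bool.eq_false_iff.mpr fun hh => ?_
            simp only [zP2, List.isPrefixOf, Bool.and_eq_true, beq_iff_eq] at hh
            obtain ⟨hoc, hrest⟩ := hh
            have hthis := LRGen t zQ NoCol_zQ (by simpa [zQ] using hrest)
            have hpen : (['p','e','n','z','c','a'] : List Char).isPrefixOf t = true := by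
              simpa [zQ] using hthis
            apply h2
            subst hoc
            simp [zP2, List.isPrefixOf, hpen]
          rw [RF_neg zR h1f, RF_neg zR hc, SF_neg (by simp [h1f, h2f])]
          simp only [List.count_cons]
          exact Nat.add_lt_add_right (ih t (by omega) hit) _

-- dropWhile keeps any infix whose first character is not whitespace
theorem DWK : ∀ (s : List Char) (c0 : Char) (q0 t : List Char),
    PySem.Chars.isspace c0 = false →
    (c0 :: q0) <:+: List.dropWhile PySem.Chars.isspace (s ++ (c0 :: q0) ++ t) := by
  intro s
  induction s with
  | nil =>
    intro c0 q0 t h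
    simp only [List.nil_append, List.cons_append, List.dropWhile_cons, h]
    exact ⟨[], t, by simp⟩
  | cons a s' ih =>
    intro c0 q0 t h
    by_cases ha : PySem.Chars.isspace a = true
    · simpa [List.dropWhile_cons, ha] using ih c0 q0 t h
    · simp only [List.cons_append, List.dropWhile_cons, Bool.eq_false_iff.mpr ha]
      simp only [Bool.false_eq_true, if_false]
      exact ⟨a :: s', t, by simp⟩

-- strip keeps the pattern (it contains no whitespace at either end)
theorem stripPat (x : List Char) (h : zPat <:+: x) :
    zPat <:+: PySem.Chars.strip x := by
  obtain ⟨s, t, hst⟩ := h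
  unfold PySem.Chars.strip PySem.Chars.lstrip PySem.Chars.rstrip
  have h1 : zPat <:+: List.dropWhile PySem.Chars.isspace x := by
    rw [← hst]
    have := DWK s 'O' ['p','e','n','Z','C','A','p','e','n','z','c','a'] t (by decide)
    simpa [show ('O'::['p','e','n','Z','C','A','p','e','n','z','c','a'] : List Char)
      = zPat from by decide] using this
  obtain ⟨s2, t2, hst2⟩ := h1
  have hrev : (List.dropWhile PySem.Chars.isspace x).reverse
      = t2.reverse ++ ('a'::['c','z','n','e','p','A','C','Z','n','e','p','O'])
        ++ s2.reverse := by
    rw [← hst2]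
    simp [show ('a'::['c','z','n','e','p','A','C','Z','n','e','p','O'] : List Char)
      = zPat.reverse from by decide]
  have h2 := DWK t2.reverse 'a' ['c','z','n','e','p','A','C','Z','n','e','p','O']
    s2.reverse (by decide)
  rw [← hrev] at h2
  have h2' : zPat.reverse <:+: List.dropWhile PySem.Chars.isspace
      (List.dropWhile PySem.Chars.isspace x).reverse := by
    simpa [show ('a'::['c','z','n','e','p','A','C','Z','n','e','p','O'] : List Char)
      = zPat.reverse from by decide] using h2
  have := List.reverse_infix.mpr h2'
  simpa using this

-- ===== VERDICT (by name: the statements are the Claim_ definitions above) =====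
theorem sanitize_zalo_message_py_spec : Claim_unchanged_sanitize_zalo_message_py := by
  intro message fallback _
  unfold Spec_sanitize_zalo_message_py
  intro hnd
  unfold sanitize_zalo_message_py sanitize_zalo_message_py_alt
  by_cases hs : PySem.Str.strip (if message = "" then "" else message) = ""
  · simp [hs]
  · simp only [if_neg hs]
    rw [show (((PySem.Dict.empty.insert "OpenZCA" "môi trường Zalo").insert
          "openzca" "môi trường Zalo").insert "runtime OpenZCA" "môi trường Zalo"
          : PySem.Dict String String).items
        = [("OpenZCA", "môi trường Zalo"), ("openzca", "môi trường Zalo"),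
           ("runtime OpenZCA", "môi trường Zalo")] from rfl]
    simp only [List.foldl_cons, List.foldl_nil]
    set s := PySem.Str.strip (if message = "" then "" else message) with hsdef
    have hni : ¬ zPat <:+: s.toList := by
      intro hi
      apply hnd
      unfold D_sanitize_zalo_message_py
      rw [PySem.Str.isIn_iff_infix]
      have hmne : message ≠ "" := by
        intro hme
        apply hs
        rw [hsdef, if_pos hme]
        decide
      have hsm : s.toList <:+: message.toList := by
        rw [hsdef, if_neg hmne, PySem.Str.toList_strip]
        exact stripInfix _
      have : ("OpenZCApenzca".toList : List Char) = zPat := by decide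
      rw [this]
      exact hi.trans hsm
    have key : (PySem.Str.replace (PySem.Str.replace (PySem.Str.replace s
        "OpenZCA" "môi trường Zalo") "openzca" "môi trường Zalo")
        "runtime OpenZCA" "môi trường Zalo").toList = SF s.toList := by
      simp only [PySem.Str.toList_replace]
      rw [replace_eq_RF _ _ _ (by decide), replace_eq_RF _ _ _ (by decide),
        replace_eq_RF _ _ _ (by decide)]
      rw [show ("OpenZCA".toList : List Char) = zP1 from by decide,
        show ("openzca".toList : List Char) = zP2 from by decide,
        show ("runtime OpenZCA".toList : List Char) = zP3 from by decide,
        show ("môi trường Zalo".toList : List Char) = zR from by decide]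
      rw [T1 s.toList.length s.toList le_rfl hni]
      exact T2 s.toList.length s.toList le_rfl
    calc PySem.Str.replace (PySem.Str.replace (PySem.Str.replace s
          "OpenZCA" "môi trường Zalo") "openzca" "môi trường Zalo")
          "runtime OpenZCA" "môi trường Zalo"
        = String.ofList (SF s.toList) := by rw [← key, String.ofList_toList]
      _ = String.ofList (pvScanGo s.toList.length s.toList) := by
          rw [pvScanGo_eq_SF _ _ le_rfl]

theorem sanitize_zalo_message_py_changed : Claim_changed_sanitize_zalo_message_py := by
  unfold Claim_changed_sanitize_zalo_message_py
  decide

theorem sanitize_zalo_message_py_tight : Claim_exact_sanitize_zalo_message_py := by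
  intro message fallback _ hd
  unfold D_sanitize_zalo_message_py at hd
  rw [PySem.Str.isIn_iff_infix,
    show ("OpenZCApenzca".toList : List Char) = zPat from by decide] at hd
  have hmne : message ≠ "" := by
    intro h
    rw [h, show ("" : String).toList = [] from rfl] at hd
    obtain ⟨s, t, hst⟩ := hd
    simp [zPat, zP1, zQ] at hst
  unfold sanitize_zalo_message_py sanitize_zalo_message_py_alt
  simp only [if_neg hmne]
  have hpat : zPat <:+: (PySem.Str.strip message).toList := by
    rw [PySem.Str.toList_strip]
    exact stripPat _ hd
  have hsne : PySem.Str.strip message ≠ "" := by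
    intro h
    rw [h, show ("" : String).toList = [] from rfl] at hpat
    obtain ⟨s, t, hst⟩ := hpat
    simp [zPat, zP1, zQ] at hst
  simp only [if_neg hsne]
  rw [show (((PySem.Dict.empty.insert "OpenZCA" "môi trường Zalo").insert
        "openzca" "môi trường Zalo").insert "runtime OpenZCA" "môi trường Zalo"
        : PySem.Dict String String).items
      = [("OpenZCA", "môi trường Zalo"), ("openzca", "môi trường Zalo"),
         ("runtime OpenZCA", "môi trường Zalo")] from rfl]
  simp only [List.foldl_cons, List.foldl_nil]
  set s := PySem.Str.strip message with hsdef
  intro heq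
  have hL := congrArg String.toList heq
  rw [String.toList_ofList] at hL
  simp only [PySem.Str.toList_replace] at hL
  rw [replace_eq_RF _ _ _ (by decide), replace_eq_RF _ _ _ (by decide),
    replace_eq_RF _ _ _ (by decide)] at hL
  rw [show ("OpenZCA".toList : List Char) = zP1 from by decide,
    show ("openzca".toList : List Char) = zP2 from by decide,
    show ("runtime OpenZCA".toList : List Char) = zP3 from by decide,
    show ("môi trường Zalo".toList : List Char) = zR from by decide] at hL
  rw [pvScanGo_eq_SF _ _ le_rfl] at hL
  have hge := M3 (RF zP2 zR (RF zP1 zR s.toList)).length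
    (RF zP2 zR (RF zP1 zR s.toList)) le_rfl
  rw [hL] at hge
  have hgt := STRICT s.toList.length s.toList le_rfl hpat
  omega
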